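-- pv_equiv track=rewrite | github.com/temvvlena/interview-prep | leetcode-easy/Array/leetcode-1507.py | reformatDate2
-- ===== SOURCE A (Python) =====
-- def reformatDate2(s: str) -> str:
--     month = {
--         "Jan": '01', "Feb": '02', "Mar": '03', "Apr": '04', "May": '05', "Jun": '06',
--         "Jul": '07', "Aug": '08', "Sep": '09', "Oct": '10', "Nov": '11', "Dec": '12'
--     }
--
--     date = s.split(" ")[::-1]
--     result = []
--     for each in date:
--         if each in month:
--             result.append(month[each])
--         else:
--             temp = []
--             for char in each:
--                 if char.isnumeric():
--                     temp.append(char)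
--             if len(temp) == 1:
--                 temp.insert(0, "0")
--             result.append("".join(temp))
--     return "-".join(result)
-- ===== SOURCE B (Python) =====
-- MONTHS = "JanFebMarAprMayJunJulAugSepOctNovDec"
--
--
-- def _piece(tok: str) -> str:
--     # A token is a month name iff it is 3 chars long and occurs at a
--     # position divisible by 3 in the packed month string: every 3-char
--     # window at index 3k of MONTHS is exactly the k-th month name.
--     i = MONTHS.find(tok)
--     if len(tok) == 3 and i >= 0 and i % 3 == 0:
--         m = i // 3 + 1
--         return ("0" + str(m)) if m < 10 else str(m)
--     digits = "".join(filter(str.isnumeric, tok))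
--     return ("0" + digits) if len(digits) == 1 else digits
--
--
-- def _build(toks):
--     # Recursion over the token list emits the pieces in reversed order
--     # with the dashes, so no reversed list is ever materialised.
--     head = _piece(toks[0])
--     return head if len(toks) == 1 else _build(toks[1:]) + "-" + head
--
--
-- def reformatDate2(s: str) -> str:
--     return _build(s.split(" "))
-- ===== Notes on version B (the rewrite author's own statement) =====
-- stated objective: alternative
-- what changed: B replaces A's reverse-then-append loop by direct recursion over the token list that emits the reversed dash-joined result, replaces the month dict by arithmetic on the token's position in one packed 3-chars-per-month string (index//3+1), and extracts digits with filter/join instead of a char loop with insert.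
import Mathlib
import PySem

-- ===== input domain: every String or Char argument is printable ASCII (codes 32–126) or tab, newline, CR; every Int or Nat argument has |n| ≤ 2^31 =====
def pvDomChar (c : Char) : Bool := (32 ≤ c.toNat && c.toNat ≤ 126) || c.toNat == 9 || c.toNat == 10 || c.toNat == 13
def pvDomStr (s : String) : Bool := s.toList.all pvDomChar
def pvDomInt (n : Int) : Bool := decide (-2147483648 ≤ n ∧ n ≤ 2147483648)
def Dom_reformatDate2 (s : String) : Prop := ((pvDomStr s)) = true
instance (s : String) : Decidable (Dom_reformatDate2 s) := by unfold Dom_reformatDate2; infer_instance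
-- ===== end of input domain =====

-- B recurses over the token list (emitting the reversed dash-joined result directly,
-- no reversed list, no append loop), finds months by arithmetic on the position in one
-- packed 3-chars-per-month string instead of a dict, and filters digits; objective: alternative.

-- ===== PORT A =====
-- the literal month dict of A (keys/values as List Char; strings handled on the Chars side)
def pvMonthA : PySem.Dict (List Char) (List Char) :=
  PySem.Dict.ofList
    [("Jan".toList, "01".toList), ("Feb".toList, "02".toList), ("Mar".toList, "03".toList),
     ("Apr".toList, "04".toList), ("May".toList, "05".toList), ("Jun".toList, "06".toList),
     ("Jul".toList, "07".toList), ("Aug".toList, "08".toList), ("Sep".toList, "09".toList),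
     ("Oct".toList, "10".toList), ("Nov".toList, "11".toList), ("Dec".toList, "12".toList)]

-- A's loop body for one token: 'each in month' + lookup = match on get?;
-- char.isnumeric() is ported as PySem.Chars.isdigit (exact on the ASCII domain Dom_)
def pvTokenA (each : List Char) : List Char :=
  match PySem.Dict.get? pvMonthA each with
  | some v => v
  | none =>
    let temp := each.foldl (fun temp c => if PySem.Chars.isdigit c then temp ++ [c] else temp) ([] : List Char)
    let temp := if temp.length = 1 then PySem.List.insert temp 0 '0' else temp
    PySem.Chars.join [] (temp.map (fun c => [c]))

def reformatDate2 (s : String) : String :=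
  -- s.split(" ")[::-1]; sep " " ≠ "" and step -1 ≠ 0, so both Options are always some
  let date := (PySem.List.slice? ((PySem.Chars.split? s.toList " ".toList).getD []) none none (-1)).getD []
  let result := date.foldl (fun result each => result ++ [pvTokenA each]) ([] : List (List Char))
  String.ofList (PySem.Chars.join "-".toList result)

-- ===== PORT B =====
def pvMonthsB : List Char := "JanFebMarAprMayJunJulAugSepOctNovDec".toList

-- B's _piece: month iff the token is 3 chars at a position divisible by 3 of MONTHS;
-- str.isnumeric again ported as PySem.Chars.isdigit (exact on ASCII)
def pvPieceB (tok : List Char) : List Char :=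
  let i := PySem.Chars.find pvMonthsB tok
  if tok.length = 3 ∧ 0 ≤ i ∧ PySem.Int.mod i 3 = 0 then
    let m := PySem.Int.floordiv i 3 + 1
    if m < 10 then '0' :: PySem.Int.toChars m else PySem.Int.toChars m
  else
    let digits := PySem.Chars.join [] ((tok.filter (fun c => PySem.Chars.isdigit c)).map (fun c => [c]))
    if digits.length = 1 then '0' :: digits else digits

-- B's _build: recursion on the token list ('toks[0]' / 'toks[1:]'); the [] case is
-- unreachable from reformatDate2_alt since split(" ") never yields an empty list
def pvBuildB : List (List Char) → List Char
  | [] => []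
  | [t] => pvPieceB t
  | t :: ts@(_ :: _) => pvBuildB ts ++ '-' :: pvPieceB t

def reformatDate2_alt (s : String) : String :=
  String.ofList (pvBuildB ((PySem.Chars.split? s.toList " ".toList).getD []))

-- ===== PRECONDITION & SPEC =====
def Spec_reformatDate2 (s : String) (out : String) : Prop := out = reformatDate2_alt s
instance (s : String) (out : String) : Decidable (Spec_reformatDate2 s out) := by unfold Spec_reformatDate2; infer_instance

-- ===== CLAIM (what is proved, stated in full; the proofs are below) =====
def Claim_equal_reformatDate2 : Prop := ∀ (s : String), Dom_reformatDate2 s → Spec_reformatDate2 s (reformatDate2 s)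

-- ===== LEMMAS AND PROOFS =====

def pvMonthNames : List (List Char) :=
  ["Jan".toList, "Feb".toList, "Mar".toList, "Apr".toList, "May".toList, "Jun".toList,
   "Jul".toList, "Aug".toList, "Sep".toList, "Oct".toList, "Nov".toList, "Dec".toList]

-- a 3-char token found at a position divisible by 3 of the packed month string IS a month name
theorem pvMonthOfFind (tok : List Char) (h3 : tok.length = 3)
    (hi : 0 ≤ PySem.Chars.find pvMonthsB tok)
    (hm : PySem.Int.mod (PySem.Chars.find pvMonthsB tok) 3 = 0) :
    tok ∈ pvMonthNames := by
  set i := PySem.Chars.find pvMonthsB tok with hidef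
  have hspec := (PySem.Chars.find_spec (s := pvMonthsB) (sub := tok) hi).1
  have hle : i ≤ (36 : Int) := by
    have := PySem.Chars.find_le_length (s := pvMonthsB) (sub := tok)
    simpa [pvMonthsB] using this
  have hlen : tok.length ≤ (pvMonthsB.drop i.toNat).length := hspec.length_le
  have hdlen : (pvMonthsB.drop i.toNat).length = 36 - i.toNat := by
    simp [pvMonthsB]
  have hmod : i.toNat % 3 = 0 := by
    rw [PySem.Int.mod_eq_emod_of_pos (by norm_num)] at hm
    omega
  have hk : i.toNat ≤ 33 := by omega
  have htake : tok = (pvMonthsB.drop i.toNat).take 3 := by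
    have := List.prefix_iff_eq_take.mp hspec
    rwa [h3] at this
  have : i.toNat = 0 ∨ i.toNat = 3 ∨ i.toNat = 6 ∨ i.toNat = 9 ∨ i.toNat = 12 ∨ i.toNat = 15 ∨
      i.toNat = 18 ∨ i.toNat = 21 ∨ i.toNat = 24 ∨ i.toNat = 27 ∨ i.toNat = 30 ∨ i.toNat = 33 := by
    omega
  rcases this with h|h|h|h|h|h|h|h|h|h|h|h <;> rw [h] at htake <;> subst htake <;> decide

-- per-token agreement of A's loop body and B's _piece
theorem pvToken_eq (tok : List Char) : pvTokenA tok = pvPieceB tok := by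
  by_cases h : tok ∈ pvMonthNames
  · simp only [pvMonthNames, List.mem_cons, List.not_mem_nil, or_false] at h
    rcases h with rfl|rfl|rfl|rfl|rfl|rfl|rfl|rfl|rfl|rfl|rfl|rfl <;> decide
  · have hcond : ¬ (tok.length = 3 ∧ 0 ≤ PySem.Chars.find pvMonthsB tok ∧
        PySem.Int.mod (PySem.Chars.find pvMonthsB tok) 3 = 0) := by
      intro ⟨h3, hi, hm⟩; exact h (pvMonthOfFind tok h3 hi hm)
    have hget : PySem.Dict.get? pvMonthA tok = none := by
      rw [PySem.Dict.get?_eq_none_iff_not_mem_keys]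
      have hkeys : pvMonthA.keys = pvMonthNames := by decide
      rw [hkeys]; exact h
    simp only [pvTokenA, pvPieceB, hget, hcond, if_false]
    rw [PySem.List.foldl_append_if (fun c => PySem.Chars.isdigit c) (fun c => c)]
    simp [PySem.Chars.join_nil_singletons, PySem.List.insert_zero, List.map_id']

-- dash-join of a nonempty list with one more piece appended
theorem pvJoinSnoc (sep a : List Char) (m : List (List Char)) (h : m ≠ []) :
    PySem.Chars.join sep (m ++ [a]) = PySem.Chars.join sep m ++ sep ++ a := by
  induction m with
  | nil => exact absurd rfl h
  | cons x xs ih =>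
    cases xs with
    | nil => simp [PySem.Chars.join_singleton, PySem.Chars.join_cons_cons]
    | cons y ys =>
      have h2 := ih (by simp)
      simp only [List.cons_append] at h2
      simp only [List.cons_append, PySem.Chars.join_cons_cons, h2, List.append_assoc]

-- B's recursion computes the dash-join of the reversed per-token pieces
theorem pvBuild_eq (toks : List (List Char)) (h : toks ≠ []) :
    pvBuildB toks = PySem.Chars.join "-".toList (toks.reverse.map pvPieceB) := by
  induction toks with
  | nil => exact absurd rfl h
  | cons t ts ih =>
    cases ts with
    | nil => simp [pvBuildB, PySem.Chars.join_singleton]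
    | cons u us =>
      simp only [pvBuildB]
      rw [ih (by simp),
          show List.map pvPieceB (t :: u :: us).reverse
              = List.map pvPieceB (u :: us).reverse ++ [pvPieceB t] from by simp,
          pvJoinSnoc _ _ _ (by simp)]
      simp

-- ===== VERDICT (by name: the statement is the Claim_ definition above) =====
theorem reformatDate2_spec : Claim_equal_reformatDate2 := by
  unfold Claim_equal_reformatDate2
  intro s _
  unfold Spec_reformatDate2 reformatDate2 reformatDate2_alt
  rw [PySem.List.slice?_none_none_neg_one]
  simp only [Option.getD_some]
  rw [PySem.List.foldl_append_singleton_eq_map]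
  cases htoks : (PySem.Chars.split? s.toList " ".toList).getD [] with
  | nil => simp [pvBuildB]
  | cons t ts =>
    have hmap : List.map pvTokenA (t :: ts).reverse = List.map pvPieceB (t :: ts).reverse :=
      List.map_congr_left (fun x _ => pvToken_eq x)
    rw [List.nil_append, hmap, pvBuild_eq _ (by simp)]
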